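-- pv_equiv track=rewrite | github.com/murutstsegu/Data-Transmission-with-Error-Detection-Methods-assignment | client2.py | parity_2d
-- ===== SOURCE A (Python) =====
-- def parity_2d(binary, row_size=8):
--     rows = [binary[i:i+row_size] for i in range(0, len(binary), row_size)]
--     matrix = []
--
--     for row in rows:
--         matrix.append(row + str(row.count("1") % 2))
--
--     col_parity = ""
--     for col in range(len(matrix[0])):
--         col_parity += str(sum(int(r[col]) for r in matrix) % 2)
--
--     matrix.append(col_parity)
--     return '\n'.join(matrix)
-- ===== SOURCE B (Python) =====
-- def parity_2d(binary, row_size=8):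
--     # Single fused pass: emit each row with its parity bit while accumulating
--     # running column sums; finish with the column-parity line.
--     out = []
--     counts = None
--     for i in range(0, len(binary), row_size):
--         row = binary[i:i+row_size]
--         line = row + str(row.count('1') % 2)
--         out.append(line)
--         if counts is None:
--             counts = [0] * len(line)
--         counts = [counts[col] + int(line[col]) for col in range(len(counts))]
--     out.append(''.join(str(c % 2) for c in counts))
--     return '\n'.join(out)
-- ===== Notes on version B (the rewrite author's own statement) =====
-- stated objective: alternative
-- what changed: A builds all rows first and then makes a second, column-major pass (for each column re-scanning every row) to form the column-parity line; B makes one fused pass over the rows, emitting each row-with-parity while accumulating a running column-count vector, and derives the parity line from that vector at the end.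
import Mathlib
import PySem

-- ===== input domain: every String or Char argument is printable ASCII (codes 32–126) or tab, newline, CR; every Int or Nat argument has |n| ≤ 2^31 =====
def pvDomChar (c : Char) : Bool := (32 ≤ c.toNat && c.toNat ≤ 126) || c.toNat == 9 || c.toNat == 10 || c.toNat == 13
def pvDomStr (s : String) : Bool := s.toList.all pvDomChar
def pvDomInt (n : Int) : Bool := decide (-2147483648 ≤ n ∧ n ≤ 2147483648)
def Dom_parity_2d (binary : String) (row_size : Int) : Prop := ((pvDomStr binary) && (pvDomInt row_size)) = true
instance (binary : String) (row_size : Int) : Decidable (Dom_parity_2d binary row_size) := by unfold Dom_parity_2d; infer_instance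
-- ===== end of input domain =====

-- B fuses A's two passes (row pass, then column-major parity pass) into one pass with a running column-count vector; objective: alternative single-pass decomposition (no speed claim).


-- shared literal expression 'int(r[col])' (both Pythons contain it verbatim);
-- the defaults ' '/0 are reached only outside Pre_ (Python raises IndexError/ValueError there)
def pvIntAt (r : List Char) (col : Int) : Int :=
  (PySem.Int.ofChars? [((PySem.List.pyGet? r col).getD ' ')]).getD 0

-- ===== PORT A =====
def parity_2d (binary : String) (row_size : Int) : String :=
  let bs := binary.toList
  let rows := (PySem.List.pyRange 0 (PySem.List.len bs) row_size).map
      (fun i => PySem.List.slice bs (some i) (some (i + row_size)))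
  let matrix := rows.foldl (fun m row =>
      m ++ [row ++ PySem.Int.toChars (PySem.Int.mod (PySem.Chars.count row ['1'] : Int) 2)]) []
  let col_parity := (PySem.List.pyRange 0 (PySem.List.len ((PySem.List.pyGet? matrix 0).getD [])) 1).foldl
      (fun acc col => acc ++ PySem.Int.toChars (PySem.Int.mod
          (matrix.foldl (fun s r => s + pvIntAt r col) 0) 2)) []
  String.ofList (PySem.Chars.join ['\n'] (matrix ++ [col_parity]))

-- ===== PORT B =====
def parity_2d_alt (binary : String) (row_size : Int) : String :=
  let bs := binary.toList
  let res := (PySem.List.pyRange 0 (PySem.List.len bs) row_size).foldl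
    (fun (st : List (List Char) × Option (List Int)) i =>
      let row := PySem.List.slice bs (some i) (some (i + row_size))
      let line := row ++ PySem.Int.toChars (PySem.Int.mod (PySem.Chars.count row ['1'] : Int) 2)
      let counts0 := match st.2 with
        | none => PySem.List.pyRepeat [(0 : Int)] (PySem.List.len line)
        | some cs => cs
      let counts1 := (PySem.List.pyRange 0 (PySem.List.len counts0) 1).map
        (fun col => PySem.List.pyGetD counts0 col 0 + pvIntAt line col)
      (st.1 ++ [line], some counts1))
    ([], none)
  let last := match res.2 with
    | none => []
    | some cs => PySem.Chars.join [] (cs.map (fun c => PySem.Int.toChars (PySem.Int.mod c 2)))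
  String.ofList (PySem.Chars.join ['\n'] (res.1 ++ [last]))

-- ===== PRECONDITION & SPEC =====
-- Pre_ excludes exactly the inputs on which the Python A raises: row_size ≤ 0 (ValueError/IndexError),
-- empty input (IndexError on matrix[0]), a ragged last row (IndexError on r[col]), and non-digit
-- characters (ValueError in int(r[col])).
def Pre_parity_2d (binary : String) (row_size : Int) : Prop :=
  0 < row_size ∧ binary.toList ≠ [] ∧
  (PySem.Int.mod (binary.toList.length : Int) row_size = 0 ∨ (binary.toList.length : Int) < row_size) ∧
  (binary.toList.all (fun c => 48 ≤ c.toNat && c.toNat ≤ 57)) = true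
instance (binary : String) (row_size : Int) : Decidable (Pre_parity_2d binary row_size) := by
  unfold Pre_parity_2d; infer_instance

def pvWitness_parity_2d : String × Int := ("10", 2)

def Spec_parity_2d (binary : String) (row_size : Int) (out : String) : Prop := out = parity_2d_alt binary row_size
instance (binary : String) (row_size : Int) (out : String) : Decidable (Spec_parity_2d binary row_size out) := by unfold Spec_parity_2d; infer_instance

-- ===== CLAIM (what is proved, stated in full; the proofs are below) =====
def Claim_equal_parity_2d : Prop := ∀ (binary : String) (row_size : Int), Dom_parity_2d binary row_size → Pre_parity_2d binary row_size → Spec_parity_2d binary row_size (parity_2d binary row_size)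

-- ===== LEMMAS AND PROOFS =====

-- proof-side abbreviations for the pieces both ports build
def pvLine (bs : List Char) (row_size i : Int) : List Char :=
  PySem.List.slice bs (some i) (some (i + row_size)) ++
    PySem.Int.toChars (PySem.Int.mod (PySem.Chars.count (PySem.List.slice bs (some i) (some (i + row_size))) ['1'] : Int) 2)

def pvAdd (cs : List Int) (line : List Char) : List Int :=
  (PySem.List.pyRange 0 (PySem.List.len cs) 1).map
    (fun col => PySem.List.pyGetD cs col 0 + pvIntAt line col)

-- B's fold, once the counts vector exists, appends lines and pvAdd-accumulates
theorem pv_fold_some (bs : List Char) (row_size : Int) (l : List Int)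
    (out : List (List Char)) (cs : List Int) :
    l.foldl (fun (st : List (List Char) × Option (List Int)) i =>
      let row := PySem.List.slice bs (some i) (some (i + row_size))
      let line := row ++ PySem.Int.toChars (PySem.Int.mod (PySem.Chars.count row ['1'] : Int) 2)
      let counts0 := match st.2 with
        | none => PySem.List.pyRepeat [(0 : Int)] (PySem.List.len line)
        | some cs => cs
      let counts1 := (PySem.List.pyRange 0 (PySem.List.len counts0) 1).map
        (fun col => PySem.List.pyGetD counts0 col 0 + pvIntAt line col)
      (st.1 ++ [line], some counts1)) (out, some cs)
    = (out ++ l.map (pvLine bs row_size),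
       some (l.foldl (fun cs i => pvAdd cs (pvLine bs row_size i)) cs)) := by
  induction l generalizing out cs with
  | nil => simp
  | cons i t ih =>
    rw [List.foldl_cons]
    show List.foldl _ (out ++ [pvLine bs row_size i], some (pvAdd cs (pvLine bs row_size i))) t = _
    rw [ih]
    simp

-- pvAdd keeps the length of the counts vector
theorem pv_len_pvAdd (cs : List Int) (line : List Char) : (pvAdd cs line).length = cs.length := by
  simp [pvAdd, PySem.List.length_pyRange_one]

-- characterization of the accumulated counts vector
theorem pv_foldl_pvAdd (lines : List (List Char)) (cs : List Int) :
    lines.foldl pvAdd cs =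
      (PySem.List.pyRange 0 (PySem.List.len cs) 1).map
        (fun col => PySem.List.pyGetD cs col 0 + (lines.map (fun r => pvIntAt r col)).sum) := by
  induction lines generalizing cs with
  | nil => simpa using (PySem.List.map_pyGetD_pyRange_zero cs 0).symm
  | cons r t ih =>
    simp only [List.foldl_cons, ih]
    have hlen : PySem.List.len (pvAdd cs r) = PySem.List.len cs := by
      simp [PySem.List.len_eq, pv_len_pvAdd]
    rw [hlen]
    apply List.map_congr_left
    intro col hcol
    have hcol' := (PySem.List.mem_pyRange_one).1 hcol
    have h0 : 0 ≤ col := hcol'.1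
    have h1 : col < (cs.length : Int) := by simpa [PySem.List.len_eq] using hcol'.2
    have : PySem.List.pyGetD (pvAdd cs r) col 0 = PySem.List.pyGetD cs col 0 + pvIntAt r col := by
      unfold pvAdd
      have hk : col.toNat < cs.length := by omega
      have hcast : col = ((col.toNat : Nat) : Int) := by omega
      rw [hcast, PySem.List.len_eq]
      rw [PySem.List.pyGetD_map_pyRange _ cs.length col.toNat 0 hk]
    rw [this]
    simp [add_assoc]

-- A's matrix-building loop is a map
theorem pv_matrixA (bs : List Char) (row_size : Int) (idx : List Int) (init : List (List Char)) :
    ((idx.map (fun i => PySem.List.slice bs (some i) (some (i + row_size)))).foldl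
      (fun m row => m ++ [row ++ PySem.Int.toChars (PySem.Int.mod (PySem.Chars.count row ['1'] : Int) 2)]) init)
    = init ++ idx.map (pvLine bs row_size) := by
  rw [PySem.List.foldl_append_singleton_eq_map]
  simp [pvLine, Function.comp]

theorem pv_join_nil (parts : List (List Char)) : PySem.Chars.join [] parts = parts.flatten := by
  induction parts with
  | nil => rfl
  | cons p t ih =>
    cases t with
    | nil => simp [PySem.Chars.join, List.intercalate, List.intersperse]
    | cons q r =>
      simp only [PySem.Chars.join, List.intercalate, List.intersperse, List.flatten_cons] at *
      simp_all

-- the index range is nonempty on Pre_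
theorem pv_idx_cons (n row_size : Int) (hn : 0 < n) (hs : 0 < row_size) :
    ∃ t, PySem.List.pyRange 0 n row_size = 0 :: t := by
  rw [PySem.List.pyRange_of_pos _ _ hs, if_pos hn]
  have h1 : 1 ≤ (n - 0 + row_size - 1) / row_size := by
    rw [Int.le_ediv_iff_mul_le hs]; omega
  have h2 : ((n - 0 + row_size - 1) / row_size).toNat ≠ 0 := by omega
  obtain ⟨m, hm⟩ := Nat.exists_eq_succ_of_ne_zero h2
  rw [hm, List.range_succ_eq_map, List.map_cons]
  exact ⟨List.map (fun k : Nat => 0 + row_size * (k : Int)) (List.map Nat.succ (List.range m)), by norm_num⟩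

set_option maxHeartbeats 1000000 in
theorem parity_2d_eq (binary : String) (row_size : Int)
    (hs : 0 < row_size) (hne : binary.toList ≠ []) :
    parity_2d binary row_size = parity_2d_alt binary row_size := by
  simp only [parity_2d, parity_2d_alt]
  have hn : 0 < PySem.List.len binary.toList := by
    simp only [PySem.List.len_eq]
    exact_mod_cast List.length_pos_iff.2 hne
  obtain ⟨t, ht⟩ := pv_idx_cons (PySem.List.len binary.toList) row_size hn hs
  rw [ht]
  simp only [List.foldl_cons, List.map_cons, List.nil_append]
  rw [pv_fold_some, pv_matrixA]
  set bs := binary.toList with hbs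
  set L0 := pvLine bs row_size 0 with hL0
  have hL0' : PySem.List.slice bs (some 0) (some (0 + row_size)) ++
      PySem.Int.toChars (PySem.Int.mod (PySem.Chars.count (PySem.List.slice bs (some 0) (some (0 + row_size))) ['1'] : Int) 2) = L0 := rfl
  set lines := L0 :: t.map (pvLine bs row_size) with hlines
  have hrep : PySem.List.pyRepeat [(0:Int)] (PySem.List.len L0) = List.replicate L0.length 0 := by
    rw [PySem.List.pyRepeat_singleton]
    simp [PySem.List.len_eq]
  -- the first step's counts vector is pvAdd of the zero vector with L0
  have hcs1 : (PySem.List.pyRange 0 (PySem.List.len (PySem.List.pyRepeat [(0:Int)] (PySem.List.len L0))) 1).map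
        (fun col => PySem.List.pyGetD (PySem.List.pyRepeat [(0:Int)] (PySem.List.len L0)) col 0 + pvIntAt L0 col)
      = pvAdd (List.replicate L0.length 0) L0 := by
    rw [hrep]; rfl
  -- final counts characterization
  have hcounts : t.foldl (fun cs i => pvAdd cs (pvLine bs row_size i)) (pvAdd (List.replicate L0.length 0) L0)
      = (PySem.List.pyRange 0 (PySem.List.len (List.replicate L0.length (0:Int))) 1).map
          (fun col => PySem.List.pyGetD (List.replicate L0.length (0:Int)) col 0 +
            (lines.map (fun r => pvIntAt r col)).sum) := by
    have : t.foldl (fun cs i => pvAdd cs (pvLine bs row_size i)) (pvAdd (List.replicate L0.length 0) L0)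
        = (t.map (pvLine bs row_size)).foldl pvAdd (pvAdd (List.replicate L0.length 0) L0) := by
      rw [List.foldl_map]
    rw [this, ← List.foldl_cons, ← hlines, pv_foldl_pvAdd]
  rw [hL0', hcs1, hcounts]
  dsimp only
  have hsingle : [L0] ++ List.map (pvLine bs row_size) t = lines := by rw [hlines]; rfl
  rw [hsingle]
  -- remaining: column-parity strings agree
  congr 2
  have hget0 : (PySem.List.pyGet? lines 0).getD [] = L0 := by
    rw [hlines, PySem.List.pyGet?_zero_cons]; rfl
  rw [hget0]
  rw [PySem.List.foldl_append_eq_flatMap, List.nil_append, List.flatMap_def]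
  rw [pv_join_nil, List.map_map]
  congr 1
  have hlen : PySem.List.len (List.replicate L0.length (0:Int)) = PySem.List.len L0 := by
    simp [PySem.List.len_eq]
  rw [hlen]
  congr 2
  apply List.map_congr_left
  intro col hcol
  have hcol' := (PySem.List.mem_pyRange_one).1 hcol
  have h1 : col < (L0.length : Int) := by
    have := hcol'.2; simpa [PySem.List.len_eq] using this
  have hget : PySem.List.pyGetD (List.replicate L0.length (0:Int)) col 0 = 0 := by
    have h0 : 0 ≤ col := hcol'.1
    rw [PySem.List.pyGetD_of_nonneg _ _ h0]
    simp
  simp only [Function.comp, hget, zero_add]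
  rw [PySem.List.foldl_add]
  simp

-- ===== VERDICT (by name: the statement is the Claim_ definition above) =====
theorem parity_2d_spec : Claim_equal_parity_2d := by
  intro binary row_size _ hpre
  unfold Spec_parity_2d
  exact parity_2d_eq binary row_size hpre.1 hpre.2.1
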